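-- pv_equiv track=rewrite | github.com/FakeRocket543/ckip-mlx | benchmark_mlx.py | decode_ws
-- ===== SOURCE A (Python) =====
-- def decode_ws(preds, spans, text):
--     words, cur = [], ""
--     for i, span_idx in enumerate(spans):
--         if span_idx is None:
--             continue
--         ch = text[span_idx]
--         if preds[i] == 0 and cur:  # B = new word
--             words.append(cur)
--             cur = ch
--         else:
--             cur += ch
--     if cur:
--         words.append(cur)
--     return words
-- ===== SOURCE B (Python) =====
-- def decode_ws(preds, spans, text):
--     # Materialise the non-None (pred, char) pairs once, then cut that flat list
--     # at word boundaries (positions k>0 with pred==0) and join each segment.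
--     pairs = [(p, text[s]) for p, s in zip(preds, spans) if s is not None]
--     words = []
--     i, n = 0, len(pairs)
--     while i < n:
--         j = i + 1
--         while j < n and pairs[j][0] != 0:
--             j += 1
--         words.append(''.join(ch for _, ch in pairs[i:j]))
--         i = j
--     return words
-- ===== Notes on version B (the rewrite author's own statement) =====
-- stated objective: alternative
-- what changed: Instead of growing a running string with branch-on-boundary state, B first flattens the non-None spans into one (pred,char) pair list and then cuts it at boundary indices (pred==0 after position 0), joining each segment; the accumulator state machine disappears.
import Mathlib
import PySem

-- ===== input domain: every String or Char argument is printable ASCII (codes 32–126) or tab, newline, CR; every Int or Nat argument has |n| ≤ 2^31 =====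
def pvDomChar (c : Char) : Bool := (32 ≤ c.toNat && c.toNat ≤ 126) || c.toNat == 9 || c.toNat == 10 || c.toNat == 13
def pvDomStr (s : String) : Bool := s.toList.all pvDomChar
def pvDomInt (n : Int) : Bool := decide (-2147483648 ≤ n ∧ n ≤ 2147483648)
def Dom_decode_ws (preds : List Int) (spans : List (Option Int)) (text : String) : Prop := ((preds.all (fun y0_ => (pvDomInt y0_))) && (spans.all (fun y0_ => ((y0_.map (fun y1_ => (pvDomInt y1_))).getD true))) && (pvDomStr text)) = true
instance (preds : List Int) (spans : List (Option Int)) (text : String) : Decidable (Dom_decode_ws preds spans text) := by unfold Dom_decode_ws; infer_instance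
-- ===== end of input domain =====

-- B replaces A's running-string state machine by: flatten the non-None (pred, char)
-- pairs once, then cut that list at word boundaries and join each segment (alternative
-- decomposition, same cost).

-- ===== PORT A =====
-- the `for i, span_idx in enumerate(spans)` loop, carrying (words, cur) with cur as chars
def decodeLoopA (preds : List Int) (text : String) : Nat → List (Option Int) → List String × List Char → List String × List Char
  | _, [], acc => acc
  | i, none :: rest, acc => decodeLoopA preds text (i+1) rest acc
  | i, some s :: rest, acc =>
      let ch := (PySem.Str.pyGet? text s).getD ' '   -- text[s]; none (IndexError) excluded by Pre_
      decodeLoopA preds text (i+1) rest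
        (if (PySem.List.pyGet? preds (i : Int)).getD 0 = 0 ∧ acc.2 ≠ [] then
           (acc.1 ++ [String.ofList acc.2], [ch])
         else
           (acc.1, acc.2 ++ [ch]))

def decode_ws (preds : List Int) (spans : List (Option Int)) (text : String) : List String :=
  let r := decodeLoopA preds text 0 spans ([], [])
  if r.2 ≠ [] then r.1 ++ [String.ofList r.2] else r.1

-- ===== PORT B =====
-- pairs = [(p, text[s]) for p, s in zip(preds, spans) if s is not None]
def pairsB (preds : List Int) (spans : List (Option Int)) (text : String) : List (Int × Char) :=
  (preds.zip spans).filterMap (fun q => q.2.map (fun s => (q.1, (PySem.Str.pyGet? text s).getD ' ')))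

-- the cutting loop of Source B: each step emits the segment pairs[i:j] (head plus the run of
-- non-boundary pairs found by the inner `while`) and continues from j; ported as the
-- structural recursion on the remaining suffix.
def chunksB : List (Int × Char) → List String
  | [] => []
  | q :: rest =>
      String.ofList (q.2 :: (rest.takeWhile (fun r => r.1 != 0)).map Prod.snd)
        :: chunksB (rest.dropWhile (fun r => r.1 != 0))
  termination_by ps => ps.length
  decreasing_by
    exact Nat.lt_succ_of_le (List.length_dropWhile_le _ _)

def decode_ws_alt (preds : List Int) (spans : List (Option Int)) (text : String) : List String :=
  chunksB (pairsB preds spans text)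

-- ===== PRECONDITION & SPEC =====
-- Pre_ excludes exactly the inputs on which Python A raises: a non-None span whose
-- position has no pred (IndexError on preds[i]) or whose value is out of range of text
-- (IndexError on text[span_idx]).
def Pre_decode_ws (preds : List Int) (spans : List (Option Int)) (text : String) : Prop :=
  ∀ i < spans.length, ∀ s ∈ spans.getD i none,
    i < preds.length ∧ PySem.Raise.InRange text.toList.length s

instance (preds : List Int) (spans : List (Option Int)) (text : String) : Decidable (Pre_decode_ws preds spans text) := by unfold Pre_decode_ws; infer_instance

def pvWitness_decode_ws : List Int × List (Option Int) × String :=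
  ([0, 1, 0, 1], [some 0, none, some 1, some 2], "abc")

def Spec_decode_ws (preds : List Int) (spans : List (Option Int)) (text : String) (out : List String) : Prop := out = decode_ws_alt preds spans text
instance (preds : List Int) (spans : List (Option Int)) (text : String) (out : List String) : Decidable (Spec_decode_ws preds spans text out) := by unfold Spec_decode_ws; infer_instance

-- ===== CLAIM (what is proved, stated in full; the proofs are below) =====
def Claim_equal_decode_ws : Prop := ∀ (preds : List Int) (spans : List (Option Int)) (text : String), Dom_decode_ws preds spans text → Pre_decode_ws preds spans text → Spec_decode_ws preds spans text (decode_ws preds spans text)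

-- ===== LEMMAS AND PROOFS =====

-- A's loop restated over the flat pair list (proof-only helper)
def loopP : List (Int × Char) → List String × List Char → List String × List Char
  | [], acc => acc
  | q :: rest, acc =>
      loopP rest
        (if q.1 = 0 ∧ acc.2 ≠ [] then (acc.1 ++ [String.ofList acc.2], [q.2])
         else (acc.1, acc.2 ++ [q.2]))

-- the pair list A's loop effectively walks (proof-only helper)
def pairsFrom (preds : List Int) (text : String) : Nat → List (Option Int) → List (Int × Char)
  | _, [] => []
  | i, none :: rest => pairsFrom preds text (i+1) rest
  | i, some s :: rest =>
      ((PySem.List.pyGet? preds (i : Int)).getD 0, (PySem.Str.pyGet? text s).getD ' ')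
        :: pairsFrom preds text (i+1) rest

def finishP (r : List String × List Char) : List String :=
  if r.2 ≠ [] then r.1 ++ [String.ofList r.2] else r.1

theorem loopA_eq_loopP (preds : List Int) (text : String) :
    ∀ (spans : List (Option Int)) (i : Nat) (acc : List String × List Char),
      decodeLoopA preds text i spans acc = loopP (pairsFrom preds text i spans) acc := by
  intro spans
  induction spans with
  | nil => intro i acc; simp [decodeLoopA, pairsFrom, loopP]
  | cons hd tl ih =>
    intro i acc
    cases hd with
    | none => simp [decodeLoopA, pairsFrom, ih]
    | some s => simp [decodeLoopA, pairsFrom, loopP, ih]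

theorem pairsFrom_eq_zip (preds : List Int) (text : String) :
    ∀ (spans : List (Option Int)) (i : Nat),
      (∀ (j : Nat) (s : Int), spans[j]? = some (some s) → i + j < preds.length) →
      pairsFrom preds text i spans =
        ((preds.drop i).zip spans).filterMap
          (fun q => q.2.map (fun s => (q.1, (PySem.Str.pyGet? text s).getD ' '))) := by
  intro spans
  induction spans with
  | nil => intro i _; simp [pairsFrom]
  | cons hd tl ih =>
    intro i H
    cases hd with
    | none =>
      have htl := ih (i+1) (fun j s hj => by
        have := H (j+1) s (by simpa using hj); omega)
      cases hdrop : preds.drop i with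
      | nil =>
        have : preds.drop (i+1) = [] := by
          have h : (preds.drop i).tail = preds.drop (i+1) := List.tail_drop
          rw [hdrop] at h; simpa using h.symm
        simp [pairsFrom, htl, this]
      | cons a l =>
        have hl : preds.drop (i+1) = l := by
          have h : (preds.drop i).tail = preds.drop (i+1) := List.tail_drop
          rw [hdrop] at h; simpa using h.symm
        simp [pairsFrom, htl, hl]
    | some s =>
      have hi : i < preds.length := by
        have := H 0 s (by simp); omega
      have htl := ih (i+1) (fun j s hj => by
        have := H (j+1) s (by simpa using hj); omega)
      have hdrop : preds.drop i = preds[i] :: preds.drop (i+1) :=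
        List.drop_eq_getElem_cons hi
      have hget : PySem.List.pyGet? preds (i : Int) = some preds[i] := by
        rw [PySem.List.pyGet?_natCast]
        exact List.getElem?_eq_getElem hi
      simp only [pairsFrom, htl, hget]
      rw [hdrop]
      simp only [List.zip_cons_cons, List.filterMap_cons, Option.map_some, Option.getD_some]

theorem loopP_chunks (ps : List (Int × Char)) :
    ∀ (ws : List String) (cur : List Char), cur ≠ [] →
      finishP (loopP ps (ws, cur)) =
        ws ++ String.ofList (cur ++ (ps.takeWhile (fun r => r.1 != 0)).map Prod.snd)
          :: chunksB (ps.dropWhile (fun r => r.1 != 0)) := by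
  induction ps with
  | nil =>
    intro ws cur hcur
    simp [loopP, finishP, hcur, chunksB]
  | cons q rest ih =>
    intro ws cur hcur
    by_cases hq : q.1 = 0
    · have hq' : (q.1 != 0) = false := by simp [hq]
      have := ih (ws ++ [String.ofList cur]) [q.2] (by simp)
      simp [loopP, hq, hcur, this, chunksB]
    · have hq' : (q.1 != 0) = true := by simpa using hq
      have := ih ws (cur ++ [q.2]) (by simp)
      simp [loopP, hq, hcur, hq', this]

theorem loopP_init (ps : List (Int × Char)) :
    finishP (loopP ps ([], [])) = chunksB ps := by
  cases ps with
  | nil => simp [loopP, finishP, chunksB]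
  | cons q rest =>
    have := loopP_chunks rest [] [q.2] (by simp)
    simp [loopP, this, chunksB]

-- ===== VERDICT (by name: the statement is the Claim_ definition above) =====
theorem decode_ws_spec : Claim_equal_decode_ws := by
  intro preds spans text _ hpre
  unfold Spec_decode_ws decode_ws decode_ws_alt
  have H : ∀ (j : Nat) (s : Int), spans[j]? = some (some s) → 0 + j < preds.length := by
    intro j s hj
    have hjlen : j < spans.length := by
      have := List.getElem?_eq_some_iff.mp hj
      exact this.1
    have hmem : s ∈ spans.getD j none := by
      unfold List.getD
      simp [hj]
    have := (hpre j hjlen s hmem).1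
    omega
  have h1 := loopA_eq_loopP preds text spans 0 ([], [])
  have h2 := pairsFrom_eq_zip preds text spans 0 H
  show finishP (decodeLoopA preds text 0 spans ([], [])) = _
  rw [h1, h2]
  simpa [pairsB] using (loopP_init _)
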